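-- pv_equiv track=rewrite | github.com/qudwn1114/Algorithm | Programmers/2019 카카오 개발자 겨울 인턴십/징검다리_건너기.py | solution
-- ===== SOURCE A (Python) =====
-- def solution(stones, k):
--     answer = 0
--     left = 1
--     right = max(stones)
--
--     if k == 1:
--         return min(stones)
--
--     while(left <= right):
--         # 연속 점프 카운트
--         count = 0
--         # mid번째 니니즈
--         mid = (left+right) // 2
--         for s in stones:
--             if s <= mid:
--                 count += 1
--             # 연속 끊기면 0으로 초기화
--             else:
--                 count = 0
--             if count == k:
--                 break
--
--         if count < k:
--             left = mid +1
--         else: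
--             right = mid -1
--             answer = mid
--
--     return answer
-- ===== SOURCE B (Python) =====
-- def solution(stones, k):
--     if k == 1:
--         return min(stones)
--     n = len(stones)
--     # Sweep the stones from weakest to strongest: once a stone wears out it is
--     # "broken"; merge it with the adjacent broken runs.  The durability of the
--     # stone that first completes a run of k broken stones is the number of
--     # people that can cross; if no such run ever forms, nobody is blocked at any
--     # point, reported as 0.
--     lo_of = list(range(n))
--     hi_of = list(range(n))
--     broken = [False] * n
--     for i in sorted(range(n), key=lambda j: stones[j]):
--         broken[i] = True
--         lo = lo_of[i - 1] if i > 0 and broken[i - 1] else i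
--         hi = hi_of[i + 1] if i + 1 < n and broken[i + 1] else i
--         lo_of[hi] = lo
--         hi_of[lo] = hi
--         if hi - lo + 1 >= k:
--             return stones[i]
--     return 0
-- ===== Notes on version B (the rewrite author's own statement) =====
-- stated objective: alternative
-- what changed: A binary-searches the answer over the value range, rescanning all stones per probe; B sorts the stone indices by durability once and sweeps weakest-first, merging adjacent runs of broken stones, returning the durability of the stone that first completes a run of k (0 if none ever forms). …
-- outside the precondition, e.g. on solution([4, 8], -3): A returns 1, B returns 4; on solution([-1, -1], 2): A returns 0, B returns -1; on solution([5, -2, -2, 5], 2): A returns 1, B returns -2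
import Mathlib
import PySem

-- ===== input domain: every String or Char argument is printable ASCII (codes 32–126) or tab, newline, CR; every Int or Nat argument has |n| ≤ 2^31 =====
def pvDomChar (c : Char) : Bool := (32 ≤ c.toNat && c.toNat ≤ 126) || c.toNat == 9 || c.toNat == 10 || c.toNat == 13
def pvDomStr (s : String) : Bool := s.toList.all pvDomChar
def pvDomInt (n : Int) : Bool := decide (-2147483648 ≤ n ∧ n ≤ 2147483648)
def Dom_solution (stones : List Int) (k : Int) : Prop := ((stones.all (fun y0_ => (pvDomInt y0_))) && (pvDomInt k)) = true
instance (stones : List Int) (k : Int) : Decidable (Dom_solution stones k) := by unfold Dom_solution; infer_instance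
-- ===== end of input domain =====

-- B replaces A's binary search over the value range (one stone scan per probe) by a single
-- weakest-first sweep over the stones sorted by durability, merging adjacent broken runs.

-- ===== PORT A =====
-- inner 'for s in stones' loop of A: consecutive count with break at count == k
def aCount (k mid : Int) : List Int → Int → Int
  | [], c => c
  | s :: t, c =>
    let c' := if s ≤ mid then c + 1 else (0 : Int)
    if c' = k then c' else aCount k mid t c'

-- A's while-loop (binary search on the value range)
def solLoop (stones : List Int) (k : Int) (left right answer : Int) : Int :=
  if _h : left ≤ right then
    let mid := PySem.Int.floordiv (left + right) 2
    let count := aCount k mid stones 0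
    if count < k then solLoop stones k (mid + 1) right answer
    else solLoop stones k left (mid - 1) mid
  else answer
termination_by (right + 1 - left).toNat
decreasing_by
  all_goals
    have hb := PySem.Int.floordiv_two_mid_bounds (lo := left) (hi := right) _h
    omega

def solution (stones : List Int) (k : Int) : Int :=
  let right := (PySem.List.max? stones (fun x => x)).getD 0
  if k = 1 then (PySem.List.min? stones (fun x => x)).getD 0
  else solLoop stones k 1 right 0

-- ===== PORT B =====
-- the 'for i in sorted(range(n), key=...)' loop of B, with its early 'return stones[i]'
def bLoop (stones : List Int) (k n : Int) : List Int → List Int → List Int → List Bool → Int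
  | [], _loOf, _hiOf, _broken => 0
  | i :: order, loOf, hiOf, broken =>
    let broken' := PySem.List.pySetD broken i true
    let lo := if 0 < i ∧ PySem.List.pyGetD broken' (i - 1) false = true
              then PySem.List.pyGetD loOf (i - 1) 0 else i
    let hiV := if i + 1 < n ∧ PySem.List.pyGetD broken' (i + 1) false = true
               then PySem.List.pyGetD hiOf (i + 1) 0 else i
    let loOf' := PySem.List.pySetD loOf hiV lo
    let hiOf' := PySem.List.pySetD hiOf lo hiV
    if k ≤ hiV - lo + 1 then PySem.List.pyGetD stones i 0
    else bLoop stones k n order loOf' hiOf' broken'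

def solution_alt (stones : List Int) (k : Int) : Int :=
  if k = 1 then (PySem.List.min? stones (fun x => x)).getD 0
  else
    let n := PySem.List.len stones
    bLoop stones k n
      (PySem.List.sorted (PySem.List.pyRange 0 n 1) (fun j => PySem.List.pyGetD stones j 0))
      (PySem.List.pyRange 0 n 1)
      (PySem.List.pyRange 0 n 1)
      (List.replicate n.toNat false)

-- ===== PRECONDITION & SPEC =====
-- Pre_ excludes the empty list (A's max() raises ValueError), k ≤ 0 (a meaningless
-- parameter, on which the two programs read the input in two equally unspecified ways)
-- and, for k ≥ 2, lists containing k consecutive non-positive durabilities — a corner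
-- outside the problem's positive-durability domain on which A's answer (confined to its
-- search range [1, max(stones)]) and B's (the durability completing the blocked run) are
-- both defensible and no specification picks one.
def Pre_solution (stones : List Int) (k : Int) : Prop :=
  stones ≠ [] ∧ 1 ≤ k ∧
    (k = 1 ∨ ∀ i < stones.length, i + k.toNat ≤ stones.length →
      ∃ j < k.toNat, 0 < stones.getD (i + j) 0)
instance (stones : List Int) (k : Int) : Decidable (Pre_solution stones k) := by
  unfold Pre_solution; infer_instance
def pvWitness_solution : List Int × Int := ([2, 2, 1], 2)

def Spec_solution (stones : List Int) (k : Int) (out : Int) : Prop := out = solution_alt stones k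
instance (stones : List Int) (k : Int) (out : Int) : Decidable (Spec_solution stones k out) := by
  unfold Spec_solution; infer_instance

-- ===== CLAIM (what is proved, stated in full; the proofs are below) =====
def Claim_equal_solution : Prop := ∀ (stones : List Int) (k : Int), Dom_solution stones k → Pre_solution stones k → Spec_solution stones k (solution stones k)

-- ===== LEMMAS AND PROOFS =====

/- Shared abstractions used only by the proofs: `sj` is element access with default 0,
   `M a b` the maximum of stones[a..b], `W i` the maximum of the k-window starting at i,
   `mmv` the minimum of all window maxima started from `hi`. -/
def sj (stones : List Int) (j : Nat) : Int := stones.getD j 0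

def M (stones : List Int) (a b : Nat) : Int :=
  ((List.range (b + 1 - a)).map (fun t => sj stones (a + t))).foldl max (sj stones a)

def W (stones : List Int) (k' i : Nat) : Int := M stones i (i + k' - 1)

def wlist (stones : List Int) (k' : Nat) : List Int :=
  (List.range (stones.length - k' + 1)).map (W stones k')

def mmv (stones : List Int) (k' : Nat) (hi : Int) : Int := (wlist stones k').foldl min hi

/- leading-run length of elements ≤ mid -/
def LR (mid : Int) : List Int → Nat
  | [] => 0
  | s :: t => if s ≤ mid then LR mid t + 1 else 0

/- some k'-window of t lies entirely ≤ mid -/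
def HW (mid : Int) (k' : Nat) (t : List Int) : Prop :=
  ∃ i, i + k' ≤ t.length ∧ ∀ j < k', sj t (i + j) ≤ mid

-- ===== interval-max lemmas =====
theorem sj_le_M (st : List Int) {a b j : Nat} (h1 : a ≤ j) (h2 : j ≤ b) :
    sj st j ≤ M st a b := by
  unfold M
  refine (PySem.List.le_foldl_max _ _).2 _ ?_
  exact List.mem_map.2 ⟨j - a, List.mem_range.2 (by omega), by congr 1; omega⟩

theorem M_mem (st : List Int) {a b : Nat} (h : a ≤ b) :
    ∃ j, a ≤ j ∧ j ≤ b ∧ M st a b = sj st j := by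
  rcases PySem.List.foldl_max_mem ((List.range (b + 1 - a)).map (fun t => sj st (a + t))) (sj st a) with hc | hc
  · exact ⟨a, le_refl a, h, hc⟩
  · rcases List.mem_map.1 hc with ⟨t, ht, hv⟩
    exact ⟨a + t, by omega, by have := List.mem_range.1 ht; omega, hv.symm⟩

theorem M_le_iff (st : List Int) {a b : Nat} (h : a ≤ b) {x : Int} :
    M st a b ≤ x ↔ ∀ j, a ≤ j → j ≤ b → sj st j ≤ x := by
  constructor
  · intro hM j h1 h2
    exact le_trans (sj_le_M st h1 h2) hM
  · intro hall
    rcases M_mem st h with ⟨j, h1, h2, hv⟩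
    rw [hv]
    exact hall j h1 h2

theorem M_mono (st : List Int) {a a' b b' : Nat} (h1 : a ≤ a') (h2 : b' ≤ b) (h3 : a' ≤ b') :
    M st a' b' ≤ M st a b := by
  rw [M_le_iff st h3]
  intro j hj1 hj2
  exact sj_le_M st (by omega) (by omega)

-- ===== A-side: characterising the inner loop =====
@[simp] theorem sj_cons_zero (s : Int) (t : List Int) : sj (s :: t) 0 = s := rfl

@[simp] theorem sj_cons_succ (s : Int) (t : List Int) (j : Nat) : sj (s :: t) (j + 1) = sj t j := rfl

theorem LR_ge_iff (mid : Int) (t : List Int) : ∀ (k' : Nat),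
    k' ≤ LR mid t ↔ (k' ≤ t.length ∧ ∀ j < k', sj t j ≤ mid) := by
  induction t with
  | nil =>
    intro k'
    constructor
    · intro h
      simp [LR] at h
      subst h
      simp
    · intro h
      simpa [LR] using h.1
  | cons s t ih =>
    intro k'
    match k' with
    | 0 => simp
    | m + 1 =>
      simp only [LR, List.length_cons]
      by_cases hs : s ≤ mid
      · rw [if_pos hs]
        rw [Nat.add_le_add_iff_right, ih m]
        constructor
        · rintro ⟨h1, h2⟩
          refine ⟨by omega, ?_⟩
          intro j hj
          match j with
          | 0 => simpa using hs
          | j + 1 => simpa using h2 j (by omega)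
        · rintro ⟨h1, h2⟩
          refine ⟨by omega, ?_⟩
          intro j hj
          simpa using h2 (j + 1) (by omega)
      · rw [if_neg hs]
        constructor
        · omega
        · rintro ⟨h1, h2⟩
          exact absurd (by simpa using h2 0 (by omega)) hs

theorem HW_cons (mid : Int) (k' : Nat) (s : Int) (t : List Int) :
    HW mid k' (s :: t) ↔ (k' ≤ LR mid (s :: t) ∨ HW mid k' t) := by
  constructor
  · rintro ⟨i, hlen, hall⟩
    match i with
    | 0 =>
      left
      rw [LR_ge_iff]
      exact ⟨by simpa using hlen, fun j hj => by simpa using hall j hj⟩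
    | i + 1 =>
      right
      refine ⟨i, by simp at hlen; omega, fun j hj => ?_⟩
      have := hall j hj
      have harr : i + 1 + j = (i + j) + 1 := by omega
      rwa [harr, sj_cons_succ] at this
  · rintro (h | ⟨i, hlen, hall⟩)
    · rw [LR_ge_iff] at h
      exact ⟨0, by simpa using h.1, fun j hj => by simpa using h.2 j hj⟩
    · refine ⟨i + 1, by simp; omega, fun j hj => ?_⟩
      have harr : i + 1 + j = (i + j) + 1 := by omega
      rw [harr, sj_cons_succ]
      exact hall j hj

theorem aCount_run (k' : Nat) (mid : Int) (hk : 2 ≤ k') :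
    ∀ (t : List Int) (c : Int), 0 ≤ c → c < (k' : Int) →
      (aCount (k' : Int) mid t c = (k' : Int) ↔
        ((k' : Int) ≤ c + (LR mid t : Int) ∨ HW mid k' t)) := by
  intro t
  induction t with
  | nil =>
    intro c h0 hc
    simp only [aCount, LR]
    constructor
    · intro h; omega
    · rintro (h | ⟨i, hlen, _⟩)
      · omega
      · simp at hlen; omega
  | cons s t ih =>
    intro c h0 hc
    simp only [aCount]
    rw [HW_cons]
    by_cases hs : s ≤ mid
    · rw [if_pos hs]
      simp only [LR, if_pos hs]
      by_cases he : c + 1 = (k' : Int)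
      · rw [if_pos he]
        constructor
        · intro _
          left
          omega
        · intro _; exact he
      · rw [if_neg he]
        rw [ih (c + 1) (by omega) (by omega)]
        constructor
        · rintro (h | h)
          · left; omega
          · right; right; exact h
        · rintro (h | h | h)
          · left; omega
          · left
            omega
          · right; exact h
    · rw [if_neg hs]
      simp only [LR, if_neg hs]
      have hz : ¬ ((0 : Int) = (k' : Int)) := by omega
      rw [if_neg hz]
      rw [ih 0 (by omega) (by omega)]
      constructor
      · rintro (h | h)
        · right; right
          have hlr : k' ≤ LR mid t := by omega
          rw [LR_ge_iff] at hlr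
          exact ⟨0, by simpa using hlr.1, fun j hj => by simpa using hlr.2 j hj⟩
        · right; right; exact h
      · rintro (h | h | h)
        · omega
        · omega
        · right; exact h

theorem aCount_lt_or_eq (k mid : Int) (hk : 2 ≤ k) :
    ∀ (t : List Int) (c : Int), 0 ≤ c → c < k →
      (aCount k mid t c = k ∨ aCount k mid t c < k) := by
  intro t
  induction t with
  | nil =>
    intro c h0 hc
    right
    simpa [aCount] using hc
  | cons s t ih =>
    intro c h0 hc
    simp only [aCount]
    by_cases hs : s ≤ mid
    · simp only [if_pos hs]
      by_cases he : c + 1 = k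
      · rw [if_pos he]; left; exact he
      · rw [if_neg he]; exact ih (c + 1) (by omega) (by omega)
    · simp only [if_neg hs]
      have hz : ¬ ((0 : Int) = k) := by omega
      rw [if_neg hz]
      exact ih 0 (by omega) (by omega)

theorem found_iff (stones : List Int) (k' : Nat) (hk : 2 ≤ k') (mid : Int) :
    ¬ (aCount (k' : Int) mid stones 0 < (k' : Int)) ↔ HW mid k' stones := by
  have hor := aCount_lt_or_eq (k' : Int) mid (by omega) stones 0 (by omega) (by omega)
  have hrun := aCount_run k' mid hk stones 0 (by omega) (by omega)
  constructor
  · intro h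
    have heq : aCount (k' : Int) mid stones 0 = (k' : Int) := by
      rcases hor with h1 | h1
      · exact h1
      · exact absurd h1 h
    rcases hrun.1 heq with h1 | h1
    · have hlr : k' ≤ LR mid stones := by omega
      rw [LR_ge_iff] at hlr
      exact ⟨0, by simpa using hlr.1, fun j hj => by simpa using hlr.2 j hj⟩
    · exact h1
  · intro h
    have heq : aCount (k' : Int) mid stones 0 = (k' : Int) := hrun.2 (Or.inr h)
    omega

theorem HW_iff_exists (stones : List Int) (k' : Nat) (hk : 1 ≤ k') (mid : Int) :
    HW mid k' stones ↔ ∃ i, i + k' ≤ stones.length ∧ W stones k' i ≤ mid := by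
  constructor
  · rintro ⟨i, hlen, hall⟩
    refine ⟨i, hlen, ?_⟩
    rw [W, M_le_iff stones (by omega)]
    intro j hj1 hj2
    have := hall (j - i) (by omega)
    have harr : i + (j - i) = j := by omega
    rwa [harr] at this
  · rintro ⟨i, hlen, hW⟩
    refine ⟨i, hlen, fun j hj => ?_⟩
    rw [W, M_le_iff stones (by omega)] at hW
    exact hW (i + j) (by omega) (by omega)

theorem HW_iff_mm (stones : List Int) (k' : Nat) (hk : 1 ≤ k') (hkn : k' ≤ stones.length)
    (hi : Int) (hW0 : W stones k' 0 ≤ hi) (mid : Int) :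
    HW mid k' stones ↔ mmv stones k' hi ≤ mid := by
  rw [HW_iff_exists stones k' hk]
  unfold mmv
  constructor
  · rintro ⟨i, hlen, hW⟩
    have hmem : W stones k' i ∈ wlist stones k' := by
      unfold wlist
      exact List.mem_map.2 ⟨i, List.mem_range.2 (by omega), rfl⟩
    exact le_trans ((PySem.List.foldl_min_le (wlist stones k') hi).2 _ hmem) hW
  · intro h
    rcases PySem.List.foldl_min_mem (wlist stones k') hi with hc | hc
    · refine ⟨0, by omega, ?_⟩
      calc W stones k' 0 ≤ hi := hW0
        _ ≤ mid := by rw [← hc]; exact h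
    · unfold wlist at hc
      rcases List.mem_map.1 hc with ⟨i, hi_mem, hv⟩
      have hir := List.mem_range.1 hi_mem
      refine ⟨i, by omega, ?_⟩
      rw [hv]
      exact h

-- ===== A-side: the binary search =====
theorem solLoop_none (stones : List Int) (k : Int)
    (h : ∀ x, aCount k x stones 0 < k) :
    ∀ l r a, solLoop stones k l r a = a := by
  intro l r a
  fun_induction solLoop stones k l r a with
  | case1 l r a hlr mid count hlt ih => exact ih
  | case2 l r a hlr mid count hlt ih =>
    exact absurd (h mid) hlt
  | case3 l r a hlr => rfl

theorem solLoop_eq (stones : List Int) (k mm : Int)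
    (hP : ∀ x, ¬ (aCount k x stones 0 < k) ↔ mm ≤ x) :
    ∀ l r a, solLoop stones k l r a = if l ≤ r ∧ mm ≤ r then max l mm else a := by
  intro l r a
  fun_induction solLoop stones k l r a with
  | case1 l r a hlr mid count hlt ih =>
    have hm : mid = PySem.Int.floordiv (l + r) 2 := rfl
    have hb := PySem.Int.floordiv_two_mid_bounds (lo := l) (hi := r) hlr
    rw [← hm] at hb
    have hmid : mid < mm := by
      by_contra hx
      exact absurd hlt ((hP mid).2 (by omega))
    rw [ih]
    by_cases hr : mm ≤ r
    · rw [if_pos ⟨by omega, hr⟩, if_pos ⟨by omega, hr⟩,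
        max_eq_right (by omega : l ≤ mm), max_eq_right (by omega : mid + 1 ≤ mm)]
    · rw [if_neg (by omega), if_neg (by omega)]
  | case2 l r a hlr mid count hlt ih =>
    have hm : mid = PySem.Int.floordiv (l + r) 2 := rfl
    have hb := PySem.Int.floordiv_two_mid_bounds (lo := l) (hi := r) hlr
    rw [← hm] at hb
    have hmid : mm ≤ mid := (hP mid).1 hlt
    rw [ih]
    by_cases h1 : l ≤ mid - 1 ∧ mm ≤ mid - 1
    · rw [if_pos h1, if_pos ⟨hlr, by omega⟩]
    · rw [if_neg h1, if_pos ⟨hlr, by omega⟩]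
      rcases not_and_or.1 h1 with h2 | h2
      · rw [max_eq_left (by omega)]
        omega
      · rw [max_eq_right (by omega)]
        omega
  | case3 l r a hlr =>
    rw [if_neg (by omega)]

theorem map_range_sj (st : List Int) : (List.range st.length).map (sj st) = st := by
  apply List.ext_getElem
  · simp
  · intro i h1 h2
    simp only [List.getElem_map, List.getElem_range]
    simp [sj, List.getD_eq_getElem?_getD, List.getElem?_eq_getElem h2]

theorem hi_eq (stones : List Int) (hne : stones ≠ []) :
    (PySem.List.max? stones (fun x => x)).getD 0 = M stones 0 (stones.length - 1) := by
  rcases stones with _ | ⟨x, t⟩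
  · exact absurd rfl hne
  · rw [PySem.List.max?_id_cons, Option.getD_some]
    unfold M
    have h1 : (x :: t).length - 1 + 1 - 0 = (x :: t).length := by simp
    rw [h1]
    have h2 : ((List.range (x :: t).length).map (fun j => sj (x :: t) (0 + j))) = x :: t := by
      calc ((List.range (x :: t).length).map (fun j => sj (x :: t) (0 + j)))
          = (List.range (x :: t).length).map (sj (x :: t)) := by
            apply List.map_congr_left
            intro a _
            simp
        _ = x :: t := map_range_sj _
    rw [h2]
    simp

theorem W_le_hi (stones : List Int) (k' : Nat) (hk : 1 ≤ k') {i : Nat}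
    (hin : i + k' ≤ stones.length) :
    W stones k' i ≤ M stones 0 (stones.length - 1) := by
  exact M_mono stones (by omega) (by omega) (by omega)

theorem A_eq (stones : List Int) (k : Int) (hne : stones ≠ []) (hk : 2 ≤ k) :
    solution stones k =
      (if (PySem.List.max? stones (fun x => x)).getD 0 < 1 then 0
       else if stones.length < k.toNat then 0
       else max 1 (mmv stones k.toNat ((PySem.List.max? stones (fun x => x)).getD 0))) := by
  obtain ⟨k', rfl⟩ : ∃ k' : Nat, k = (k' : Int) := ⟨k.toNat, by omega⟩
  have hk' : 2 ≤ k' := by exact_mod_cast hk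
  simp only [solution, Int.toNat_natCast]
  rw [if_neg (by omega : ¬ (k' : Int) = 1)]
  set hi := (PySem.List.max? stones (fun x => x)).getD 0 with hhi_def
  have hiM : hi = M stones 0 (stones.length - 1) := hi_eq stones hne
  by_cases hhi : hi < 1
  · rw [solLoop, dif_neg (by omega : ¬ (1 : Int) ≤ hi), if_pos hhi]
  · rw [if_neg hhi]
    by_cases hnk : stones.length < k'
    · rw [if_pos hnk]
      apply solLoop_none
      intro x
      by_contra hx
      rcases (found_iff stones k' hk' x).1 hx with ⟨i, hlen, _⟩
      omega
    · rw [if_neg hnk]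
      have hkn : k' ≤ stones.length := by omega
      have hW0 : W stones k' 0 ≤ hi := by
        rw [hiM]
        exact W_le_hi stones k' (by omega) (by omega)
      have hP : ∀ x, ¬ (aCount (k' : Int) x stones 0 < (k' : Int)) ↔ mmv stones k' hi ≤ x := by
        intro x
        rw [found_iff stones k' hk' x]
        exact HW_iff_mm stones k' (by omega) hkn hi hW0 x
      rw [solLoop_eq stones (k' : Int) (mmv stones k' hi) hP 1 hi 0]
      have hmhi : mmv stones k' hi ≤ hi := (PySem.List.foldl_min_le _ _).1
      rw [if_pos ⟨by omega, hmhi⟩]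

-- ===== B-side: runs of broken stones =====

/- left end of the run of `true`s ending at j (given P j) -/
def lend (P : Nat → Bool) : Nat → Nat
  | 0 => 0
  | j + 1 => if P j then lend P j else j + 1

/- right end of the run of `true`s starting at j (given P j), inside [0, n) -/
def rend (P : Nat → Bool) (n : Nat) (j : Nat) : Nat :=
  if _h : j + 1 < n ∧ P (j + 1) = true then rend P n (j + 1) else j
termination_by n - j
decreasing_by omega

/- [a, b] is a maximal run of `true`s of P inside [0, n) -/
def maxRun (P : Nat → Bool) (n a b : Nat) : Prop :=
  a ≤ b ∧ b < n ∧ (∀ j, a ≤ j → j ≤ b → P j = true) ∧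
    (a = 0 ∨ P (a - 1) = false) ∧ (b + 1 = n ∨ P (b + 1) = false)

theorem lend_le (P : Nat → Bool) : ∀ j, lend P j ≤ j := by
  intro j
  induction j with
  | zero => simp [lend]
  | succ j ih =>
    rw [lend]
    split
    · omega
    · omega

theorem lend_spec (P : Nat → Bool) : ∀ j,
    (∀ t, lend P j ≤ t → t < j → P t = true) ∧ (lend P j = 0 ∨ P (lend P j - 1) = false) := by
  intro j
  induction j with
  | zero => exact ⟨fun t h1 h2 => by omega, Or.inl rfl⟩
  | succ j ih =>
    rw [lend]
    by_cases hP : P j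
    · rw [if_pos hP]
      refine ⟨fun t h1 h2 => ?_, ih.2⟩
      by_cases ht : t < j
      · exact ih.1 t h1 ht
      · have : t = j := by omega
        subst this; exact hP
    · rw [if_neg hP]
      refine ⟨fun t h1 h2 => by omega, Or.inr ?_⟩
      simpa using eq_false_of_ne_true hP

theorem rend_spec (P : Nat → Bool) (n : Nat) : ∀ j, j < n →
    (j ≤ rend P n j ∧ rend P n j < n ∧
      (∀ t, j < t → t ≤ rend P n j → P t = true) ∧
      (rend P n j + 1 = n ∨ P (rend P n j + 1) = false)) := by
  suffices hd : ∀ d j, j < n → n - j ≤ d →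
      (j ≤ rend P n j ∧ rend P n j < n ∧
        (∀ t, j < t → t ≤ rend P n j → P t = true) ∧
        (rend P n j + 1 = n ∨ P (rend P n j + 1) = false)) by
    intro j hj
    exact hd (n - j) j hj (le_refl _)
  intro d
  induction d with
  | zero => intro j hj hd; omega
  | succ d ihd =>
    intro j hj hd
    rw [rend]
    by_cases hc : j + 1 < n ∧ P (j + 1) = true
    · rw [dif_pos hc]
      obtain ⟨h0, h1, h2, h3⟩ := ihd (j + 1) hc.1 (by omega)
      refine ⟨by omega, h1, ?_, h3⟩
      intro t ht1 ht2
      by_cases ht : t = j + 1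
      · subst ht; exact hc.2
      · exact h2 t (by omega) ht2
    · rw [dif_neg hc]
      refine ⟨le_refl j, hj, fun t h1 h2 => by omega, ?_⟩
      by_cases h1 : j + 1 = n
      · exact Or.inl h1
      · right
        rcases Bool.eq_false_or_eq_true (P (j + 1)) with h | h
        · exact absurd ⟨by omega, h⟩ hc
        · exact h

theorem maxRun_of_true (P : Nat → Bool) (n j : Nat) (hP : P j = true) (hj : j < n) :
    maxRun P n (lend P j) (rend P n j) := by
  obtain ⟨hl1, hl2⟩ := lend_spec P j
  obtain ⟨hr0, hr1, hr2, hr3⟩ := rend_spec P n j hj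
  refine ⟨le_trans (lend_le P j) hr0, hr1, ?_, hl2, hr3⟩
  intro t h1 h2
  by_cases ht : t < j
  · exact hl1 t h1 ht
  · by_cases ht2 : t = j
    · subst ht2; exact hP
    · exact hr2 t (by omega) h2

theorem maxRun_unique {P : Nat → Bool} {n a b c d j : Nat}
    (h1 : maxRun P n a b) (h2 : maxRun P n c d)
    (hj1 : a ≤ j ∧ j ≤ b) (hj2 : c ≤ j ∧ j ≤ d) : a = c ∧ b = d := by
  obtain ⟨hab, hbn, hall1, hL1, hR1⟩ := h1
  obtain ⟨hcd, hdn, hall2, hL2, hR2⟩ := h2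
  constructor
  · by_contra hne
    rcases Nat.lt_or_ge a c with h | h
    · have hPc : P (c - 1) = true := hall1 (c - 1) (by omega) (by omega)
      rcases hL2 with h0 | h0
      · omega
      · rw [hPc] at h0; cases h0
    · have hlt : c < a := by omega
      have hPa : P (a - 1) = true := hall2 (a - 1) (by omega) (by omega)
      rcases hL1 with h0 | h0
      · omega
      · rw [hPa] at h0; cases h0
  · by_contra hne
    rcases Nat.lt_or_ge b d with h | h
    · have hPb : P (b + 1) = true := hall2 (b + 1) (by omega) (by omega)
      rcases hR1 with h0 | h0
      · omega
      · rw [hPb] at h0; cases h0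
    · have hlt : d < b := by omega
      have hPd : P (d + 1) = true := hall1 (d + 1) (by omega) (by omega)
      rcases hR2 with h0 | h0
      · omega
      · rw [hPd] at h0; cases h0

theorem maxRun_of_block (P : Nat → Bool) (n k' i0 : Nat) (hk : 1 ≤ k')
    (hin : i0 + k' ≤ n) (hall : ∀ j, i0 ≤ j → j < i0 + k' → P j = true) :
    ∃ a b, maxRun P n a b ∧ k' ≤ b + 1 - a := by
  have hP0 : P i0 = true := hall i0 (le_refl _) (by omega)
  refine ⟨lend P i0, rend P n i0, maxRun_of_true P n i0 hP0 (by omega), ?_⟩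
  have hl := lend_le P i0
  obtain ⟨hr0, hr1, hr2, hr3⟩ := rend_spec P n i0 (by omega)
  by_cases hge : i0 + k' - 1 ≤ rend P n i0
  · omega
  · exfalso
    have h1 : rend P n i0 + 1 < i0 + k' := by omega
    have hPt : P (rend P n i0 + 1) = true := hall _ (by omega) (by omega)
    rcases hr3 with h0 | h0
    · omega
    · rw [hPt] at h0; cases h0

theorem getD_set_self {α : Type} (xs : List α) (m : Nat) (v d : α) (hm : m < xs.length) :
    (xs.set m v).getD m d = v := by
  rw [List.getD_eq_getElem?_getD, List.getElem?_set_self hm, Option.getD_some]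

theorem getD_set_ne {α : Type} (xs : List α) (m j : Nat) (v d : α) (hj : j ≠ m) :
    (xs.set m v).getD j d = xs.getD j d := by
  rw [List.getD_eq_getElem?_getD, List.getElem?_set_ne (by omega), ← List.getD_eq_getElem?_getD]

theorem rend_stop (P : Nat → Bool) (n j : Nat) (h : ¬ (j + 1 < n ∧ P (j + 1) = true)) :
    rend P n j = j := by
  rw [rend]; exact dif_neg h

-- ===== B-side: the sweep loop =====
theorem bLoop_main (stones : List Int) (k' : Nat) (hk : 2 ≤ k') (hn1 : 1 ≤ stones.length) :
    ∀ (rest pref loOf hiOf : List Int) (broken : List Bool),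
      pref ++ rest =
        PySem.List.sorted (PySem.List.pyRange 0 (stones.length : Int) 1)
          (fun j => PySem.List.pyGetD stones j 0) →
      broken.length = stones.length → loOf.length = stones.length →
      hiOf.length = stones.length →
      (∀ j : Nat, j < stones.length → (broken.getD j false = true ↔ (j : Int) ∈ pref)) →
      (∀ a b : Nat, maxRun (fun j => broken.getD j false) stones.length a b →
        loOf.getD b 0 = (a : Int) ∧ hiOf.getD a 0 = (b : Int)) →
      (∀ a b : Nat, maxRun (fun j => broken.getD j false) stones.length a b → b + 1 - a < k') →
      bLoop stones (k' : Int) (stones.length : Int) rest loOf hiOf broken =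
        (if k' ≤ stones.length
         then mmv stones k' (M stones 0 (stones.length - 1)) else 0) := by
  intro rest
  induction rest with
  | nil =>
    intro pref loOf hiOf broken hO hblen hlolen hhilen hmem hrun hnoBig
    have hall : ∀ j, j < stones.length → broken.getD j false = true := by
      intro j hj
      rw [hmem j hj]
      have hjm : (j : Int) ∈ pref ++ ([] : List Int) := by
        rw [hO, PySem.List.mem_sorted, PySem.List.mem_pyRange_one]
        constructor
        · omega
        · exact_mod_cast hj
      simpa using hjm
    have hbig : maxRun (fun j => broken.getD j false) stones.length 0 (stones.length - 1) := by
      refine ⟨by omega, by omega, ?_, Or.inl rfl, Or.inl (by omega)⟩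
      intro j h1 h2
      exact hall j (by omega)
    have hlt := hnoBig 0 (stones.length - 1) hbig
    simp only [bLoop]
    rw [if_neg (by omega)]
  | cons i rest ih =>
    intro pref loOf hiOf broken hO hblen hlolen hhilen hmem hrun hnoBig
    have hperm : (pref ++ i :: rest).Perm (PySem.List.pyRange 0 (stones.length : Int) 1) := by
      rw [hO]
      exact PySem.List.sorted_perm _ _ _
    have himem : i ∈ PySem.List.pyRange 0 (stones.length : Int) 1 :=
      hperm.mem_iff.1 (by simp)
    obtain ⟨hi0, hi1⟩ := PySem.List.mem_pyRange_one.1 himem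
    obtain ⟨iN, hiN, rfl⟩ : ∃ m : Nat, m < stones.length ∧ i = (m : Int) :=
      ⟨i.toNat, by omega, by omega⟩
    have hnd : (pref ++ (iN : Int) :: rest).Nodup :=
      hperm.nodup_iff.2 (PySem.List.nodup_pyRange_one _ _)
    have hinp : (iN : Int) ∉ pref := by
      intro hin
      have hdisj := (List.nodup_append.1 hnd).2.2
      exact hdisj _ hin _ (by simp) rfl
    -- notation
    set n := stones.length with hn
    set P : Nat → Bool := fun j => broken.getD j false with hPdef
    have hPi : P iN = false := by
      rcases Bool.eq_false_or_eq_true (P iN) with h | h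
      · exact absurd ((hmem iN hiN).1 h) hinp
      · exact h
    have hpair : (pref ++ (iN : Int) :: rest).Pairwise
        (fun a b => PySem.List.pyGetD stones a 0 ≤ PySem.List.pyGetD stones b 0) := by
      rw [hO]
      exact PySem.List.sorted_pairwise _ _
    have hprefle : ∀ x ∈ pref, PySem.List.pyGetD stones x 0 ≤ sj stones iN := by
      intro x hx
      have := (List.pairwise_append.1 hpair).2.2 x hx ((iN : Int)) (by simp)
      rwa [PySem.List.pyGetD_natCast] at this
    have hrestge : ∀ x ∈ (iN : Int) :: rest, sj stones iN ≤ PySem.List.pyGetD stones x 0 := by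
      intro x hx
      rcases List.mem_cons.1 hx with rfl | hx
      · rw [PySem.List.pyGetD_natCast]
        exact le_refl _
      · have hp2 := (List.pairwise_append.1 hpair).2.1
        have := (List.pairwise_cons.1 hp2).1 x hx
        rwa [PySem.List.pyGetD_natCast] at this
    -- the updated broken list
    have hbset : PySem.List.pySetD broken (iN : Int) true = broken.set iN true :=
      PySem.List.pySetD_natCast _ _ _
    have hP' : ∀ j : Nat, (broken.set iN true).getD j false = if j = iN then true else P j := by
      intro j
      by_cases hj : j = iN
      · subst hj
        rw [if_pos rfl, getD_set_self _ _ _ _ (by omega)]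
      · rw [if_neg hj, getD_set_ne _ _ _ _ _ hj]
    -- the two neighbour conditions as read by the code
    have hc1iff : ((0 : Int) < (iN : Int) ∧
        PySem.List.pyGetD (PySem.List.pySetD broken (iN : Int) true) ((iN : Int) - 1) false = true)
        ↔ (0 < iN ∧ P (iN - 1) = true) := by
      constructor
      · rintro ⟨h1, h2⟩
        have h1' : 0 < iN := by exact_mod_cast h1
        refine ⟨h1', ?_⟩
        rw [hbset, (by omega : (iN : Int) - 1 = ((iN - 1 : Nat) : Int)),
          PySem.List.pyGetD_natCast, hP', if_neg (by omega)] at h2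
        exact h2
      · rintro ⟨h1, h2⟩
        refine ⟨by exact_mod_cast h1, ?_⟩
        rw [hbset, (by omega : (iN : Int) - 1 = ((iN - 1 : Nat) : Int)),
          PySem.List.pyGetD_natCast, hP', if_neg (by omega)]
        exact h2
    have hc2iff : (((iN : Int) + 1 < (n : Int)) ∧
        PySem.List.pyGetD (PySem.List.pySetD broken (iN : Int) true) ((iN : Int) + 1) false = true)
        ↔ (iN + 1 < n ∧ P (iN + 1) = true) := by
      constructor
      · rintro ⟨h1, h2⟩
        refine ⟨by exact_mod_cast h1, ?_⟩
        rw [hbset, (by push_cast; ring : (iN : Int) + 1 = ((iN + 1 : Nat) : Int)),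
          PySem.List.pyGetD_natCast, hP', if_neg (by omega)] at h2
        exact h2
      · rintro ⟨h1, h2⟩
        refine ⟨by exact_mod_cast h1, ?_⟩
        rw [hbset, (by push_cast; ring : (iN : Int) + 1 = ((iN + 1 : Nat) : Int)),
          PySem.List.pyGetD_natCast, hP', if_neg (by omega)]
        exact h2
    -- run ends of the new run
    set aN : Nat := if 0 < iN ∧ P (iN - 1) = true then lend P (iN - 1) else iN with haN
    set bN : Nat := if iN + 1 < n ∧ P (iN + 1) = true then rend P n (iN + 1) else iN with hbN
    have haN_le : aN ≤ iN := by
      rw [haN]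
      split
      · have := lend_le P (iN - 1); omega
      · omega
    have hbN_ge : iN ≤ bN := by
      rw [hbN]
      split
      · have := (rend_spec P n (iN + 1) (by omega)).1; omega
      · omega
    have hbN_lt : bN < n := by
      rw [hbN]
      split
      · exact (rend_spec P n (iN + 1) (by omega)).2.1
      · omega
    -- the code's lo and hi values
    have hlo : (if (0 : Int) < (iN : Int) ∧
          PySem.List.pyGetD (PySem.List.pySetD broken (iN : Int) true) ((iN : Int) - 1) false = true
        then PySem.List.pyGetD loOf ((iN : Int) - 1) 0 else (iN : Int)) = (aN : Int) := by
      by_cases hc : 0 < iN ∧ P (iN - 1) = true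
      · rw [if_pos (hc1iff.2 hc), haN, if_pos hc,
          (by omega : (iN : Int) - 1 = ((iN - 1 : Nat) : Int)), PySem.List.pyGetD_natCast]
        have hmr : maxRun P n (lend P (iN - 1)) (iN - 1) := by
          have h1 := maxRun_of_true P n (iN - 1) hc.2 (by omega)
          have h2 : rend P n (iN - 1) = iN - 1 := by
            apply rend_stop
            rintro ⟨_, hPt⟩
            rw [(by omega : iN - 1 + 1 = iN), hPi] at hPt
            cases hPt
          rwa [h2] at h1
        exact (hrun _ _ hmr).1
      · rw [if_neg (fun h => hc (hc1iff.1 h)), haN, if_neg hc]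
    have hhiV : (if ((iN : Int) + 1 < (n : Int)) ∧
          PySem.List.pyGetD (PySem.List.pySetD broken (iN : Int) true) ((iN : Int) + 1) false = true
        then PySem.List.pyGetD hiOf ((iN : Int) + 1) 0 else (iN : Int)) = (bN : Int) := by
      by_cases hc : iN + 1 < n ∧ P (iN + 1) = true
      · rw [if_pos (hc2iff.2 hc), hbN, if_pos hc,
          (by push_cast; ring : (iN : Int) + 1 = ((iN + 1 : Nat) : Int)), PySem.List.pyGetD_natCast]
        have hmr : maxRun P n (iN + 1) (rend P n (iN + 1)) := by
          have h1 := maxRun_of_true P n (iN + 1) hc.2 hc.1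
          have h2 : lend P (iN + 1) = iN + 1 := by
            rw [lend, if_neg (by rw [hPi]; exact Bool.false_ne_true)]
          rwa [h2] at h1
        exact (hrun _ _ hmr).2
      · rw [if_neg (fun h => hc (hc2iff.1 h)), hbN, if_neg hc]
    -- the new run is maximal for the updated broken list
    have hP'run : maxRun (fun j => (broken.set iN true).getD j false) n aN bN := by
      refine ⟨by omega, hbN_lt, ?_, ?_, ?_⟩
      · intro j h1 h2
        beta_reduce
        rw [hP']
        by_cases hj : j = iN
        · rw [if_pos hj]
        · rw [if_neg hj]
          by_cases hjlt : j < iN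
          · have hc : 0 < iN ∧ P (iN - 1) = true := by
              by_contra hcn
              rw [haN, if_neg hcn] at h1
              omega
            rw [haN, if_pos hc] at h1
            by_cases hje : j = iN - 1
            · subst hje; exact hc.2
            · exact (lend_spec P (iN - 1)).1 j h1 (by omega)
          · have hjgt : iN < j := by omega
            have hc : iN + 1 < n ∧ P (iN + 1) = true := by
              by_contra hcn
              rw [hbN, if_neg hcn] at h2
              omega
            rw [hbN, if_pos hc] at h2
            by_cases hje : j = iN + 1
            · subst hje; exact hc.2
            · exact (rend_spec P n (iN + 1) hc.1).2.2.1 j (by omega) h2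
      · by_cases hc : 0 < iN ∧ P (iN - 1) = true
        · rw [haN, if_pos hc]
          rcases (lend_spec P (iN - 1)).2 with h0 | h0
          · exact Or.inl h0
          · right
            beta_reduce
            rw [hP', if_neg (by have := lend_le P (iN - 1); omega)]
            exact h0
        · rw [haN, if_neg hc]
          by_cases h0 : iN = 0
          · exact Or.inl h0
          · right
            beta_reduce
            rw [hP', if_neg (by omega)]
            rcases Bool.eq_false_or_eq_true (P (iN - 1)) with h | h
            · exact absurd ⟨by omega, h⟩ hc
            · exact h
      · by_cases hc : iN + 1 < n ∧ P (iN + 1) = true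
        · rw [hbN, if_pos hc]
          rcases (rend_spec P n (iN + 1) hc.1).2.2.2 with h0 | h0
          · exact Or.inl h0
          · right
            beta_reduce
            rw [hP', if_neg (by have := (rend_spec P n (iN + 1) hc.1).1; omega)]
            exact h0
        · rw [hbN, if_neg hc]
          by_cases h0 : iN + 1 = n
          · exact Or.inl h0
          · right
            beta_reduce
            rw [hP', if_neg (by omega)]
            rcases Bool.eq_false_or_eq_true (P (iN + 1)) with h | h
            · exact absurd ⟨by omega, h⟩ hc
            · exact h
    -- one unfolding of the loop
    have hstep : bLoop stones (k' : Int) (n : Int) ((iN : Int) :: rest) loOf hiOf broken =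
        (if (k' : Int) ≤ (bN : Int) - (aN : Int) + 1 then PySem.List.pyGetD stones (iN : Int) 0
         else bLoop stones (k' : Int) (n : Int) rest
            (PySem.List.pySetD loOf (bN : Int) (aN : Int))
            (PySem.List.pySetD hiOf (aN : Int) (bN : Int))
            (PySem.List.pySetD broken (iN : Int) true)) := by
      simp only [bLoop]
      rw [hlo, hhiV]
    rw [hstep]
    by_cases hbig : (k' : Int) ≤ (bN : Int) - (aN : Int) + 1
    · -- the sweep stops: stones[iN] is the answer
      have hbig' : k' ≤ bN + 1 - aN := by omega
      have hkn : k' ≤ n := by omega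
      rw [if_pos hbig, if_pos hkn, PySem.List.pyGetD_natCast]
      have hval_le : ∀ j : Nat, j ≠ iN → (broken.set iN true).getD j false = true →
          j < n → sj stones j ≤ sj stones iN := by
        intro j hj hPj hjn
        rw [hP', if_neg hj] at hPj
        have hjp := (hmem j hjn).1 hPj
        have := hprefle _ hjp
        rwa [PySem.List.pyGetD_natCast] at this
      have hWa : W stones k' aN ≤ sj stones iN := by
        rw [W, M_le_iff stones (by omega)]
        intro j hj1 hj2
        by_cases hje : j = iN
        · subst hje; exact le_refl _
        · refine hval_le j hje ?_ (by omega)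
          have := hP'run.2.2.1 j hj1 (by omega)
          beta_reduce at this
          exact this
      have h1 : mmv stones k' (M stones 0 (n - 1)) ≤ sj stones iN := by
        refine le_trans ?_ hWa
        unfold mmv
        refine (PySem.List.foldl_min_le _ _).2 _ ?_
        unfold wlist
        exact List.mem_map.2 ⟨aN, List.mem_range.2 (by omega), rfl⟩
      have h2 : sj stones iN ≤ mmv stones k' (M stones 0 (n - 1)) := by
        unfold mmv
        rcases PySem.List.foldl_min_mem (wlist stones k') (M stones 0 (n - 1)) with hc | hc
        · rw [hc]
          exact sj_le_M stones (by omega) (by omega)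
        · unfold wlist at hc
          rcases List.mem_map.1 hc with ⟨i0, hi0m, hv⟩
          have hi0r := List.mem_range.1 hi0m
          have hi0k : i0 + k' ≤ n := by omega
          obtain ⟨j0, hj01, hj02, hnotP⟩ : ∃ j, i0 ≤ j ∧ j < i0 + k' ∧ P j = false := by
            by_contra hcon
            push Not at hcon
            have hblock : ∀ j, i0 ≤ j → j < i0 + k' → P j = true := by
              intro j ha hb
              rcases Bool.eq_false_or_eq_true (P j) with h | h
              · exact h
              · exact absurd h (hcon j ha hb)
            obtain ⟨a, b, hmr, hlen⟩ := maxRun_of_block P n k' i0 (by omega) hi0k hblock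
            have := hnoBig a b hmr
            omega
          have hj0mem : (j0 : Int) ∈ pref ++ (iN : Int) :: rest := by
            rw [hO, PySem.List.mem_sorted, PySem.List.mem_pyRange_one]
            constructor
            · omega
            · exact_mod_cast (by omega : j0 < n)
          have hj0r : (j0 : Int) ∈ (iN : Int) :: rest := by
            rcases List.mem_append.1 hj0mem with h | h
            · refine absurd ((hmem j0 (by omega)).2 h) ?_
              intro hq
              have hq' : P j0 = true := hq
              rw [hq'] at hnotP
              cases hnotP
            · exact h
          have hle := hrestge _ hj0r
          rw [PySem.List.pyGetD_natCast] at hle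
          calc sj stones iN ≤ sj stones j0 := hle
            _ ≤ W stones k' i0 := sj_le_M stones hj01 (by omega)
            _ = _ := hv
      exact le_antisymm h2 h1
    · -- the run is still short: continue, with the invariant re-established
      rw [if_neg hbig]
      have hsmall : bN + 1 - aN < k' := by omega
      rw [hbset, PySem.List.pySetD_natCast loOf bN (aN : Int),
          PySem.List.pySetD_natCast hiOf aN (bN : Int)]
      refine ih (pref ++ [(iN : Int)]) _ _ _ ?_ ?_ ?_ ?_ ?_ ?_ ?_
      · rw [List.append_assoc]
        simpa using hO
      · simpa using hblen
      · simpa using hlolen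
      · simpa using hhilen
      · intro j hj
        rw [hP']
        by_cases hje : j = iN
        · subst hje
          simp
        · rw [if_neg hje, List.mem_append]
          rw [hmem j hj]
          constructor
          · exact Or.inl
          · rintro (h | h)
            · exact h
            · simp at h
              exact absurd (by exact_mod_cast h) hje
      · intro a b hmr
        by_cases hcont : a ≤ iN ∧ iN ≤ b
        · obtain ⟨rfl, rfl⟩ := maxRun_unique hmr hP'run hcont ⟨haN_le, hbN_ge⟩
          constructor
          · rw [getD_set_self _ _ _ _ (by omega)]
          · rw [getD_set_self _ _ _ _ (by omega)]
        · -- a maximal run not containing iN is an old maximal run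
          have hiout : iN < a ∨ b < iN := by omega
          have hmrold : maxRun P n a b := by
            obtain ⟨h1, h2, h3, h4, h5⟩ := hmr
            refine ⟨h1, h2, ?_, ?_, ?_⟩
            · intro j ha hb
              have := h3 j ha hb
              beta_reduce at this
              rwa [hP', if_neg (by omega)] at this
            · rcases h4 with h | h
              · exact Or.inl h
              · right
                beta_reduce at h
                by_cases hje : a - 1 = iN
                · rw [hP', if_pos hje] at h
                  cases h
                · rwa [hP', if_neg hje] at h
            · rcases h5 with h | h
              · exact Or.inl h
              · right
                beta_reduce at h
                by_cases hje : b + 1 = iN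
                · rw [hP', if_pos hje] at h
                  cases h
                · rwa [hP', if_neg hje] at h
          have hab : a ≠ aN ∧ b ≠ bN := by
            constructor
            · intro he
              obtain ⟨he1, he2⟩ := maxRun_unique hmr hP'run ⟨le_refl a, hmr.1⟩
                ⟨by omega, by omega⟩
              omega
            · intro he
              obtain ⟨he1, he2⟩ := maxRun_unique hmr hP'run ⟨hmr.1, le_refl b⟩
                ⟨by omega, by omega⟩
              omega
          obtain ⟨ho1, ho2⟩ := hrun a b hmrold
          constructor
          · rw [getD_set_ne _ _ _ _ _ hab.2]
            exact ho1
          · rw [getD_set_ne _ _ _ _ _ hab.1]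
            exact ho2
      · intro a b hmr
        by_cases hcont : a ≤ iN ∧ iN ≤ b
        · obtain ⟨rfl, rfl⟩ := maxRun_unique hmr hP'run hcont ⟨haN_le, hbN_ge⟩
          exact hsmall
        · have hiout : iN < a ∨ b < iN := by omega
          have hmrold : maxRun P n a b := by
            obtain ⟨h1, h2, h3, h4, h5⟩ := hmr
            refine ⟨h1, h2, ?_, ?_, ?_⟩
            · intro j ha hb
              have := h3 j ha hb
              beta_reduce at this
              rwa [hP', if_neg (by omega)] at this
            · rcases h4 with h | h
              · exact Or.inl h
              · right
                beta_reduce at h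
                by_cases hje : a - 1 = iN
                · rw [hP', if_pos hje] at h
                  cases h
                · rwa [hP', if_neg hje] at h
            · rcases h5 with h | h
              · exact Or.inl h
              · right
                beta_reduce at h
                by_cases hje : b + 1 = iN
                · rw [hP', if_pos hje] at h
                  cases h
                · rwa [hP', if_neg hje] at h
          exact hnoBig a b hmrold


theorem B_eq (stones : List Int) (k : Int) (hne : stones ≠ []) (hk : 2 ≤ k) :
    solution_alt stones k =
      (if k.toNat ≤ stones.length
       then mmv stones k.toNat (M stones 0 (stones.length - 1)) else 0) := by
  obtain ⟨k', rfl⟩ : ∃ k' : Nat, k = (k' : Int) := ⟨k.toNat, by omega⟩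
  have hk' : 2 ≤ k' := by exact_mod_cast hk
  have hn1 : 1 ≤ stones.length := List.length_pos_iff.2 hne
  simp only [solution_alt, PySem.List.len_eq, Int.toNat_natCast]
  rw [if_neg (by omega : ¬ (k' : Int) = 1)]
  refine bLoop_main stones k' hk' hn1 _ [] _ _ _ ?_ ?_ ?_ ?_ ?_ ?_ ?_
  · simp
  · simp
  · simp [PySem.List.length_pyRange_one]
  · simp [PySem.List.length_pyRange_one]
  · intro j hj
    simp [List.getD_eq_getElem?_getD, hj]
  · intro a b hmr
    exfalso
    have h := hmr.2.2.1 a (le_refl a) hmr.1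
    beta_reduce at h
    rw [List.getD_eq_getElem?_getD, List.getElem?_replicate] at h
    simp [show a < stones.length by have := hmr.1; have := hmr.2.1; omega] at h
  · intro a b hmr
    exfalso
    have h := hmr.2.2.1 a (le_refl a) hmr.1
    beta_reduce at h
    rw [List.getD_eq_getElem?_getD, List.getElem?_replicate] at h
    simp [show a < stones.length by have := hmr.1; have := hmr.2.1; omega] at h

-- ===== VERDICT (by name: the statement is the Claim_ definition above) =====
theorem solution_spec : Claim_equal_solution := by
  intro stones k _hdom hpre
  obtain ⟨hne, hk1, hnr⟩ := hpre
  unfold Spec_solution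
  by_cases hk : k = 1
  · subst hk
    simp [solution, solution_alt]
  · have hk2 : 2 ≤ k := by omega
    rw [A_eq stones k hne hk2, B_eq stones k hne hk2]
    have hNR := hnr.resolve_left hk
    obtain ⟨k', rfl⟩ : ∃ k' : Nat, k = (k' : Int) := ⟨k.toNat, by omega⟩
    have hk' : 2 ≤ k' := by exact_mod_cast hk2
    simp only [Int.toNat_natCast] at hNR ⊢
    have hn1 : 1 ≤ stones.length := List.length_pos_iff.2 hne
    rw [hi_eq stones hne]
    by_cases hkn : k' ≤ stones.length
    · have hWwin : ∀ i, i + k' ≤ stones.length → 1 ≤ W stones k' i := by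
        intro i hik
        obtain ⟨j0, hj0, hpos⟩ := hNR i (by omega) hik
        have hle : sj stones (i + j0) ≤ W stones k' i :=
          sj_le_M stones (by omega) (by omega)
        have : 0 < sj stones (i + j0) := hpos
        omega
      have hhi1 : 1 ≤ M stones 0 (stones.length - 1) := by
        have h0 := hWwin 0 (by omega)
        have := W_le_hi stones k' (by omega) (by omega : 0 + k' ≤ stones.length)
        omega
      have hm1 : 1 ≤ mmv stones k' (M stones 0 (stones.length - 1)) := by
        unfold mmv wlist
        rcases PySem.List.foldl_min_mem (wlist stones k') (M stones 0 (stones.length - 1)) with hc | hc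
        · unfold wlist at hc
          rw [hc]; exact hhi1
        · unfold wlist at hc
          rcases List.mem_map.1 hc with ⟨i0, hi0m, hv⟩
          have hi0r := List.mem_range.1 hi0m
          rw [← hv]
          exact hWwin i0 (by omega)
      rw [if_neg (by omega), if_neg (by omega), if_pos hkn]
      exact max_eq_right hm1
    · rw [if_neg hkn]
      split_ifs <;> first | rfl | omega
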